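-- pv_equiv track=rewrite | github.com/AlifSrSE/ProblemSolves | 1328F-makeKEqual.py | alif
-- ===== SOURCE A (Python) =====
-- def alif(n, k, a):
--     a.sort()
--     min_moves = float('inf')
--
--     for target in range(a[0], a[-1] + 1):
--         moves = 0
--         for i in range(n):
--             if i < n - k:
--                 moves += target - a[i]
--             elif i >= n - k and a[i] < target:
--                 moves += target - a[i]
--             elif i >= n - k and a[i] > target:
--                 moves += a[i] - target
--         min_moves = min(min_moves, moves)
--
--     return min_moves
-- ===== SOURCE B (Python) =====
-- # B: the move cost is convex piecewise-linear in the target, so instead of scanning every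
-- # integer target in [min(a), max(a)] like A, evaluate it only at the element breakpoints
-- # plus the two range endpoints, each in O(1) via prefix sums.
-- # Note: A sorts `a` in place; B leaves `a` unmodified (return value is what is compared).
-- def alif(n, k, a):
--     s = sorted(a)
--     lo, hi = s[0], s[-1]
--     nn = max(n, 0)
--     c = min(max(n - k, 0), nn)
--     lin = sum(s[:c])
--     b = s[c:nn]
--     m = len(b)
--     pref = [0]
--     for x in b:
--         pref.append(pref[-1] + x)
--
--     def cost(t, j):
--         # valid whenever b[:j] <= t <= b[j:]
--         return c * t - lin + (t * j - pref[j]) + ((pref[m] - pref[j]) - t * (m - j))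
--
--     best = cost(lo, 0)
--     for i in range(m):
--         best = min(best, cost(b[i], i))
--     best = min(best, cost(hi, m))
--     return best
-- ===== Notes on version B (the rewrite author's own statement) =====
-- stated objective: faster
-- what changed: A scans every integer target between min(a) and max(a) and recomputes the n-term move cost for each; B exploits that the cost is convex piecewise-linear in the target and evaluates it only at the element breakpoints plus the two range endpoints.
import Mathlib
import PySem

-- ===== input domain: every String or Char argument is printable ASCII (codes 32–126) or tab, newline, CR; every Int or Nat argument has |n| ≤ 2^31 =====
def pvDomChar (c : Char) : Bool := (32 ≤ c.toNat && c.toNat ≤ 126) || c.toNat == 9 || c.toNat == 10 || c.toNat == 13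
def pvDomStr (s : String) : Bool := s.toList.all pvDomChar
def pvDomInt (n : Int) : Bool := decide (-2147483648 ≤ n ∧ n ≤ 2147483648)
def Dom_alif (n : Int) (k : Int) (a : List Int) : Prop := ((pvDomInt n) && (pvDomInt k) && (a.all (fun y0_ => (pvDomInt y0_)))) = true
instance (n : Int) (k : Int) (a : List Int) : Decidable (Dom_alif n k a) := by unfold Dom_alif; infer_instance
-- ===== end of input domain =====

-- B replaces A's scan of every integer target in [min a, max a] by evaluating the convex
-- piecewise-linear cost only at the element breakpoints plus the two range endpoints.
-- (A sorts `a` in place; B does not mutate `a` — the claim is about the return value.)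

-- ===== PORT A =====
def alif (n : Int) (k : Int) (a : List Int) : Int :=
  let s := PySem.List.sorted a (fun x => x) false
  let lo := (PySem.List.pyGet? s 0).getD 0
  let hi := (PySem.List.pyGet? s (-1)).getD 0
  ((PySem.List.pyRange lo (hi + 1) 1).foldl
    (fun (mm : Option Int) target =>
      let moves := (PySem.List.pyRange 0 n 1).foldl
        (fun (moves : Int) i =>
          let ai := (PySem.List.pyGet? s i).getD 0
          if i < n - k then moves + (target - ai)
          else if n - k ≤ i ∧ ai < target then moves + (target - ai)
          else if n - k ≤ i ∧ target < ai then moves + (ai - target)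
          else moves) 0
      match mm with
      | none => some moves
      | some m => some (min m moves)) none).getD 0

-- ===== PORT B =====
def alif_alt (n : Int) (k : Int) (a : List Int) : Int :=
  let s := PySem.List.sorted a (fun x => x) false
  let lo := (PySem.List.pyGet? s 0).getD 0
  let hi := (PySem.List.pyGet? s (-1)).getD 0
  let nn := max n 0
  let c := min (max (n - k) 0) nn
  let lin := (PySem.List.slice s none (some c)).sum
  let b := PySem.List.slice s (some c) (some nn)
  let m : Int := (b.length : Int)
  let pref := b.foldl (fun (acc : List Int) x => acc ++ [((PySem.List.pyGet? acc (-1)).getD 0) + x]) [0]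
  let cost := fun (t j : Int) =>
    let pj := (PySem.List.pyGet? pref j).getD 0
    let pm := (PySem.List.pyGet? pref m).getD 0
    c * t - lin + (t * j - pj) + ((pm - pj) - t * (m - j))
  let best := cost lo 0
  let best := (PySem.List.pyRange 0 m 1).foldl
    (fun best i => min best (cost ((PySem.List.pyGet? b i).getD 0) i)) best
  min best (cost hi m)

-- ===== PRECONDITION & SPEC =====
-- Pre_ excludes exactly the inputs on which the Python A raises IndexError:
-- the empty list (a[0]) and n > len(a) (a[i] inside the loop).
def Pre_alif (n : Int) (k : Int) (a : List Int) : Prop := a ≠ [] ∧ n ≤ (a.length : Int)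
instance (n : Int) (k : Int) (a : List Int) : Decidable (Pre_alif n k a) := by unfold Pre_alif; infer_instance
def pvWitness_alif : Int × Int × List Int := (3, 2, [1, 2, 3])

def Spec_alif (n : Int) (k : Int) (a : List Int) (out : Int) : Prop := out = alif_alt n k a
instance (n : Int) (k : Int) (a : List Int) (out : Int) : Decidable (Spec_alif n k a out) := by unfold Spec_alif; infer_instance

-- ===== CLAIM (what is proved, stated in full; the proofs are below) =====
def Claim_equal_alif : Prop := ∀ (n : Int) (k : Int) (a : List Int), Dom_alif n k a → Pre_alif n k a → Spec_alif n k a (alif n k a)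

-- ===== LEMMAS AND PROOFS =====

/-- The convex piecewise-linear cost both programs minimise. -/
def costF (c lin : Int) (b : List Int) (t : Int) : Int :=
  c * t - lin + (b.map (fun x => |t - x|)).sum

/-- A's inner loop, as a named function of the target. -/
def innerA (n k : Int) (s : List Int) (target : Int) : Int :=
  (PySem.List.pyRange 0 n 1).foldl
    (fun (moves : Int) i =>
      let ai := (PySem.List.pyGet? s i).getD 0
      if i < n - k then moves + (target - ai)
      else if n - k ≤ i ∧ ai < target then moves + (target - ai)
      else if n - k ≤ i ∧ target < ai then moves + (ai - target)
      else moves) 0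

lemma alif_eq (n k : Int) (a : List Int) :
    alif n k a =
      (let s := PySem.List.sorted a (fun x => x) false
       let lo := (PySem.List.pyGet? s 0).getD 0
       let hi := (PySem.List.pyGet? s (-1)).getD 0
       ((PySem.List.pyRange lo (hi + 1) 1).foldl
         (fun (mm : Option Int) target =>
           match mm with
           | none => some (innerA n k s target)
           | some m => some (min m (innerA n k s target))) none).getD 0) := rfl

/-- The prefix-sum list B builds. -/
def prefL (b : List Int) : List Int :=
  b.foldl (fun (acc : List Int) x => acc ++ [((PySem.List.pyGet? acc (-1)).getD 0) + x]) [0]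

/-- B's O(1) cost evaluation at target `t` with split point `j`. -/
def costP (c lin : Int) (b : List Int) (t j : Int) : Int :=
  c * t - lin + (t * j - (PySem.List.pyGet? (prefL b) j).getD 0)
    + (((PySem.List.pyGet? (prefL b) ((b.length : Int))).getD 0
        - (PySem.List.pyGet? (prefL b) j).getD 0)
       - t * ((b.length : Int) - j))

lemma alt_eq (n k : Int) (a : List Int) :
    alif_alt n k a =
      (let s := PySem.List.sorted a (fun x => x) false
       let lo := (PySem.List.pyGet? s 0).getD 0
       let hi := (PySem.List.pyGet? s (-1)).getD 0
       let nn := max n 0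
       let c := min (max (n - k) 0) nn
       let lin := (PySem.List.slice s none (some c)).sum
       let b := PySem.List.slice s (some c) (some nn)
       min ((PySem.List.pyRange 0 (b.length : Int) 1).foldl
              (fun best i => min best (costP c lin b ((PySem.List.pyGet? b i).getD 0) i))
              (costP c lin b lo 0))
          (costP c lin b hi (b.length : Int))) := rfl

lemma optfold (g : Int → Int) : ∀ (l : List Int) (m : Int),
    l.foldl (fun (mm : Option Int) target =>
        match mm with
        | none => some (g target)
        | some m' => some (min m' (g target))) (some m)
      = some (l.foldl (fun acc t => min acc (g t)) m) := by
  intro l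
  induction l with
  | nil => intro m; rfl
  | cons x xs ih => intro m; simpa using ih (min m (g x))

lemma sum_map_sub_const (t : Int) : ∀ (l : List Int),
    (l.map (fun x => t - x)).sum = (l.length : Int) * t - l.sum := by
  intro l
  induction l with
  | nil => simp
  | cons x xs ih => simp [ih]; push_cast; ring

lemma sum_range_map_getD (f : Int → Int) : ∀ (m a : Nat) (l : List Int), a + m ≤ l.length →
    ((List.range m).map (fun j => f (l.getD (a + j) 0))).sum
      = (((l.drop a).take m).map f).sum := by
  intro m
  induction m with
  | zero => intro a l _; simp
  | succ m ih =>
    intro a l h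
    have hm : a + m < l.length := by omega
    have h1 : (l.drop a)[m]? = some l[a + m] := by
      rw [List.getElem?_drop]; exact List.getElem?_eq_getElem hm
    have h2 : l.getD (a + m) 0 = l[a + m] := by
      rw [List.getD_eq_getElem?_getD, List.getElem?_eq_getElem hm]; rfl
    rw [List.range_succ, List.map_append, List.sum_append,
        List.take_add_one, h1, List.map_append, List.sum_append, ← ih a l (by omega)]
    simp [List.getElem?_eq_getElem hm]

/-- A's inner loop computes the piecewise-linear cost. -/
lemma inner_eq (n k : Int) (s : List Int) (t : Int) (hn : n ≤ (s.length : Int)) :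
    innerA n k s t =
      costF (min (max (n - k) 0) (max n 0))
            ((s.take (min (max (n - k) 0) (max n 0)).toNat).sum)
            ((s.drop (min (max (n - k) 0) (max n 0)).toNat).take
              ((max n 0).toNat - (min (max (n - k) 0) (max n 0)).toNat)) t := by
  rcases le_or_gt n 0 with hn0 | hn0
  · have hmax : max n 0 = 0 := max_eq_right hn0
    have hc : min (max (n - k) 0) (max n 0) = 0 := by
      rw [hmax]; exact min_eq_right (le_max_right _ _)
    rw [innerA, PySem.List.pyRange_one_eq_nil hn0]
    simp [costF, hc, hmax]
  · -- 0 < n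
    set c : Int := min (max (n - k) 0) (max n 0) with hcdef
    have hmax : max n 0 = n := max_eq_left hn0.le
    have hc0 : 0 ≤ c := by rw [hcdef]; exact le_min (le_max_right _ _) (le_max_right _ _)
    have hcn : c ≤ n := by rw [hcdef, hmax]; exact min_le_right _ _
    set nt : Nat := n.toNat with hntdef
    set ct : Nat := c.toNat with hctdef
    have hnt : (nt : Int) = n := Int.toNat_of_nonneg hn0.le
    have hct : (ct : Int) = c := Int.toNat_of_nonneg hc0
    have hctnt : ct ≤ nt := by omega
    have hntlen : nt ≤ s.length := by omega
    -- the inner fold as a sum over indices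
    have step1 : innerA n k s t
        = ((List.range nt).map (fun (j : Nat) =>
            if (j : Int) < n - k then t - s.getD j 0 else |t - s.getD j 0|)).sum := by
      rw [innerA, show PySem.List.pyRange 0 n 1 = (List.range nt).map (fun (k : Nat) => (k : Int)) from by
        rw [← hnt]; exact PySem.List.pyRange_zero_natCast nt, List.foldl_map]
      have hfun : (fun (moves : Int) (j : Nat) =>
            let ai := (PySem.List.pyGet? s (j : Int)).getD 0
            if (j : Int) < n - k then moves + (t - ai)
            else if n - k ≤ (j : Int) ∧ ai < t then moves + (t - ai)
            else if n - k ≤ (j : Int) ∧ t < ai then moves + (ai - t)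
            else moves)
          = (fun (moves : Int) (j : Nat) =>
            moves + (if (j : Int) < n - k then t - s.getD j 0 else |t - s.getD j 0|)) := by
        funext moves j
        simp only [PySem.List.pyGet?_natCast, ← List.getD_eq_getElem?_getD]
        split_ifs with h1 h2 h3
        · rfl
        · rcases abs_cases (t - s.getD j 0) with ⟨h, h'⟩ | ⟨h, h'⟩ <;> rw [h] <;> omega
        · rcases abs_cases (t - s.getD j 0) with ⟨h, h'⟩ | ⟨h, h'⟩ <;> rw [h] <;> omega
        · rcases abs_cases (t - s.getD j 0) with ⟨h, h'⟩ | ⟨h, h'⟩ <;> rw [h] <;> omega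
      rw [hfun, PySem.List.foldl_add, zero_add]
    rw [step1]
    have hsplit : List.range nt = List.range ct ++ (List.range (nt - ct)).map (fun x => ct + x) := by
      rw [← List.range_add (n := ct) (m := nt - ct), Nat.add_sub_cancel' hctnt]
    rw [hsplit, List.map_append, List.sum_append, List.map_map]
    -- first segment: all indices are in the linear part
    have hfirst : (List.range ct).map (fun (j : Nat) =>
          if (j : Int) < n - k then t - s.getD j 0 else |t - s.getD j 0|)
        = (List.range ct).map (fun (j : Nat) => t - s.getD j 0) := by
      apply List.map_congr_left
      intro j hj
      have hjct : j < ct := List.mem_range.1 hj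
      have : (j : Int) < n - k := by omega
      rw [if_pos this]
    -- second segment: all indices are in the absolute part
    have hsecond : (List.range (nt - ct)).map ((fun (j : Nat) =>
          if (j : Int) < n - k then t - s.getD j 0 else |t - s.getD j 0|) ∘ (fun x => ct + x))
        = (List.range (nt - ct)).map (fun (j : Nat) => |t - s.getD (ct + j) 0|) := by
      apply List.map_congr_left
      intro j hj
      have hjct : j < nt - ct := List.mem_range.1 hj
      simp only [Function.comp]
      have hge : ¬ ((ct + j : Nat) : Int) < n - k := by
        push_cast
        omega
      rw [if_neg hge]
    rw [hfirst, hsecond]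
    have e1 : ((List.range ct).map (fun j => t - s.getD j 0)).sum
        = ((s.take ct).map (fun x => t - x)).sum := by
      have := sum_range_map_getD (fun x => t - x) ct 0 s (by omega)
      simpa using this
    have e2 : ((List.range (nt - ct)).map (fun (j : Nat) => |t - s.getD (ct + j) 0|)).sum
        = (((s.drop ct).take (nt - ct)).map (fun x => |t - x|)).sum := by
      exact sum_range_map_getD (fun x => |t - x|) (nt - ct) ct s (by omega)
    rw [e1, e2, sum_map_sub_const]
    rw [costF]
    have hmaxnt : (max n 0).toNat = nt := by omega
    rw [hmax] at *
    rw [hmaxnt]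
    have : ((s.take ct).length : Int) = c := by
      have : (s.take ct).length = ct := by
        rw [List.length_take]
        omega
      rw [this, hct]
    rw [this]

lemma condMax (t : Int) : ∀ (l : List Int) (acc : Int), acc ≤ t →
    (l.foldl (fun a x => if x ≤ t then max a x else a) acc ≤ t
     ∧ (l.foldl (fun a x => if x ≤ t then max a x else a) acc = acc
        ∨ l.foldl (fun a x => if x ≤ t then max a x else a) acc ∈ l)
     ∧ acc ≤ l.foldl (fun a x => if x ≤ t then max a x else a) acc
     ∧ ∀ x ∈ l, x ≤ t → x ≤ l.foldl (fun a x => if x ≤ t then max a x else a) acc) := by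
  intro l
  induction l with
  | nil => intro acc h; exact ⟨h, Or.inl rfl, le_rfl, by simp⟩
  | cons x xs ih =>
    intro acc h
    by_cases hx : x ≤ t
    · obtain ⟨p1, p2, p3, p4⟩ := ih (max acc x) (max_le h hx)
      simp only [List.foldl_cons, if_pos hx]
      refine ⟨p1, ?_, le_trans (le_max_left _ _) p3, ?_⟩
      · rcases p2 with h2 | h2
        · rcases max_choice acc x with hm | hm
          · exact Or.inl (h2.trans hm)
          · exact Or.inr (by rw [h2, hm]; exact List.mem_cons_self)
        · exact Or.inr (List.mem_cons_of_mem _ h2)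
      · intro y hy hyt
        rcases List.mem_cons.1 hy with rfl | hy
        · exact le_trans (le_max_right _ _) p3
        · exact p4 y hy hyt
    · simp only [List.foldl_cons, if_neg hx]
      obtain ⟨p1, p2, p3, p4⟩ := ih acc h
      refine ⟨p1, ?_, p3, ?_⟩
      · rcases p2 with h2 | h2
        · exact Or.inl h2
        · exact Or.inr (List.mem_cons_of_mem _ h2)
      · intro y hy hyt
        rcases List.mem_cons.1 hy with rfl | hy
        · exact absurd hyt hx
        · exact p4 y hy hyt

lemma condMin (t : Int) : ∀ (l : List Int) (acc : Int), t ≤ acc →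
    (t ≤ l.foldl (fun a x => if t ≤ x then min a x else a) acc
     ∧ (l.foldl (fun a x => if t ≤ x then min a x else a) acc = acc
        ∨ l.foldl (fun a x => if t ≤ x then min a x else a) acc ∈ l)
     ∧ l.foldl (fun a x => if t ≤ x then min a x else a) acc ≤ acc
     ∧ ∀ x ∈ l, t ≤ x → l.foldl (fun a x => if t ≤ x then min a x else a) acc ≤ x) := by
  intro l
  induction l with
  | nil => intro acc h; exact ⟨h, Or.inl rfl, le_rfl, by simp⟩
  | cons x xs ih =>
    intro acc h
    by_cases hx : t ≤ x
    · obtain ⟨p1, p2, p3, p4⟩ := ih (min acc x) (le_min h hx)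
      simp only [List.foldl_cons, if_pos hx]
      refine ⟨p1, ?_, le_trans p3 (min_le_left _ _), ?_⟩
      · rcases p2 with h2 | h2
        · rcases min_choice acc x with hm | hm
          · exact Or.inl (h2.trans hm)
          · exact Or.inr (by rw [h2, hm]; exact List.mem_cons_self)
        · exact Or.inr (List.mem_cons_of_mem _ h2)
      · intro y hy hyt
        rcases List.mem_cons.1 hy with rfl | hy
        · exact le_trans p3 (min_le_right _ _)
        · exact p4 y hy hyt
    · simp only [List.foldl_cons, if_neg hx]
      obtain ⟨p1, p2, p3, p4⟩ := ih acc h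
      refine ⟨p1, ?_, p3, ?_⟩
      · rcases p2 with h2 | h2
        · exact Or.inl h2
        · exact Or.inr (List.mem_cons_of_mem _ h2)
      · intro y hy hyt
        rcases List.mem_cons.1 hy with rfl | hy
        · exact absurd hyt hx
        · exact p4 y hy hyt

lemma S_shift (u v w : Int) (huw : u ≤ w) (hwv : w ≤ v) : ∀ (b : List Int),
    (∀ x ∈ b, x ≤ u ∨ v ≤ x) →
    (b.map (fun x => |w - x|)).sum
      = (b.map (fun x => |u - x|)).sum
        + (((b.filter (fun x => decide (x ≤ u))).length : Int)
           - ((b.filter (fun x => !decide (x ≤ u))).length : Int)) * (w - u) := by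
  intro b
  induction b with
  | nil => intro _; simp
  | cons x xs ih =>
    intro hb
    have hx := hb x List.mem_cons_self
    have ihh := ih (fun y hy => hb y (List.mem_cons_of_mem _ hy))
    by_cases hxu : x ≤ u
    · have h1 : |w - x| = w - x := abs_of_nonneg (by omega)
      have h2 : |u - x| = u - x := abs_of_nonneg (by omega)
      simp only [List.map_cons, List.sum_cons, List.filter_cons, hxu, decide_true,
        Bool.not_true, Bool.false_eq_true, if_false, if_true, List.length_cons, h1, h2, ihh]
      push_cast
      ring
    · have hvx : v ≤ x := hx.resolve_left hxu
      have h1 : |w - x| = x - w := by rw [abs_sub_comm]; exact abs_of_nonneg (by omega)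
      have h2 : |u - x| = x - u := by rw [abs_sub_comm]; exact abs_of_nonneg (by omega)
      simp only [List.map_cons, List.sum_cons, List.filter_cons, hxu, decide_false,
        Bool.not_false, Bool.true_eq_false, if_false, if_true, List.length_cons, h1, h2, ihh]
      push_cast
      ring

/-- On an interval free of breakpoints the cost is linear, hence minimised at an end. -/
lemma gap (c lin u v t : Int) (hu : u ≤ t) (hv : t ≤ v) (b : List Int)
    (hb : ∀ x ∈ b, x ≤ u ∨ v ≤ x) :
    min (costF c lin b u) (costF c lin b v) ≤ costF c lin b t := by
  have ht := S_shift u v t hu hv b hb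
  have hvv := S_shift u v v (le_trans hu hv) le_rfl b hb
  set p := ((b.filter (fun x => decide (x ≤ u))).length : Int) with hp
  set q := ((b.filter (fun x => !decide (x ≤ u))).length : Int) with hq
  rcases le_or_gt 0 (c + (p - q)) with hs | hs
  · refine le_trans (min_le_left _ _) ?_
    unfold costF
    rw [ht]
    nlinarith [mul_nonneg hs (sub_nonneg.2 hu)]
  · refine le_trans (min_le_right _ _) ?_
    unfold costF
    rw [ht, hvv]
    nlinarith [mul_nonneg (by omega : (0:Int) ≤ -(c + (p - q))) (sub_nonneg.2 hv)]

lemma le_getLast_of_pairwise : ∀ (l : List Int), l.Pairwise (· ≤ ·) →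
    ∀ (h : l ≠ []) (x : Int), x ∈ l → x ≤ l.getLast h := by
  intro l
  induction l with
  | nil => intro _ h; exact absurd rfl h
  | cons a t ih =>
    intro hp h x hx
    rcases List.pairwise_cons.1 hp with ⟨ha, hpt⟩
    cases t with
    | nil => simp only [List.mem_singleton] at hx; simp [hx, List.getLast]
    | cons b t' =>
      rw [List.getLast_cons (by simp)]
      rcases List.mem_cons.1 hx with rfl | hxt
      · exact le_trans (ha _ (List.getLast_mem _)) le_rfl
      · exact ih hpt (by simp) x hxt

lemma optfold_cons (g : Int → Int) (x : Int) (l : List Int) :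
    ((x :: l).foldl (fun (mm : Option Int) target =>
        match mm with
        | none => some (g target)
        | some m' => some (min m' (g target))) none)
      = some (l.foldl (fun acc t => min acc (g t)) (g x)) := by
  rw [List.foldl_cons]
  exact optfold g l (g x)

lemma foldl_min_eq_map {α : Type} (F : α → Int) (l : List α) (i : Int) :
    l.foldl (fun acc t => min acc (F t)) i = (l.map F).foldl min i := (List.foldl_map).symm

lemma foldl_min_map_cast (G : Int → Int) (l : List Nat) (i : Int) :
    (l.map (fun (x : Nat) => (x : Int))).foldl (fun acc t => min acc (G t)) i
      = (l.map (fun (x : Nat) => G (x : Int))).foldl min i := by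
  rw [List.foldl_map, List.foldl_map]

lemma sum_map_sub_const' (t : Int) : ∀ (l : List Int),
    (l.map (fun x => x - t)).sum = l.sum - (l.length : Int) * t := by
  intro l
  induction l with
  | nil => simp
  | cons x xs ih => simp [ih]; push_cast; ring

lemma pref_fold : ∀ (b acc : List Int),
    b.foldl (fun acc x => acc ++ [((PySem.List.pyGet? acc (-1)).getD 0) + x]) acc
      = acc ++ (List.range b.length).map (fun j => acc.getLastD 0 + (b.take (j + 1)).sum) := by
  intro b
  induction b with
  | nil => intro acc; simp
  | cons x xs ih =>
    intro acc
    have hlast : ((PySem.List.pyGet? acc (-1)).getD 0) = acc.getLastD 0 := by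
      rw [PySem.List.pyGet?_neg_one, ← List.getLastD_eq_getLast?]
    rw [List.foldl_cons, hlast, ih (acc ++ [acc.getLastD 0 + x])]
    rw [List.append_assoc]
    congr 1
    rw [List.length_cons, List.range_succ_eq_map, List.map_cons, List.map_map,
        List.singleton_append]
    congr 1
    · simp
    · apply List.map_congr_left
      intro j _
      simp [List.getLastD_concat, List.take_succ_cons, Function.comp]
      ring

lemma prefL_get : ∀ (b : List Int) (j : Nat), j ≤ b.length →
    (PySem.List.pyGet? (prefL b) (j : Int)).getD 0 = (b.take j).sum := by
  intro b j hj
  rw [prefL, pref_fold b [0], PySem.List.pyGet?_natCast]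
  cases j with
  | zero => simp
  | succ j' =>
    have hj' : j' < b.length := by omega
    rw [List.singleton_append, List.getElem?_cons_succ, List.getElem?_map,
        List.getElem?_range hj']
    simp [List.getLast]

lemma costP_eq (c lin t : Int) (b : List Int) (j : Nat) (hj : j ≤ b.length)
    (h1 : ∀ x ∈ b.take j, x ≤ t) (h2 : ∀ x ∈ b.drop j, t ≤ x) :
    costP c lin b t (j : Int) = costF c lin b t := by
  rw [costP, costF, prefL_get b j hj, prefL_get b b.length le_rfl, List.take_length]
  have hsplit : b = b.take j ++ b.drop j := (List.take_append_drop j b).symm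
  rw [show (b.map fun x => |t - x|) = (b.take j ++ b.drop j).map fun x => |t - x| from by
        rw [← hsplit]]
  rw [List.map_append, List.sum_append]
  have e1 : (b.take j).map (fun x => |t - x|) = (b.take j).map (fun x => t - x) :=
    List.map_congr_left (fun x hx => abs_of_nonneg (by have := h1 x hx; omega))
  have e2 : (b.drop j).map (fun x => |t - x|) = (b.drop j).map (fun x => x - t) :=
    List.map_congr_left (fun x hx => by
      rw [abs_sub_comm]; exact abs_of_nonneg (by have := h2 x hx; omega))
  rw [e1, e2, sum_map_sub_const, sum_map_sub_const']
  have l1 : ((b.take j).length : Int) = (j : Int) := by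
    rw [List.length_take]; omega
  have l2 : ((b.drop j).length : Int) = (b.length : Int) - (j : Int) := by
    rw [List.length_drop]; push_cast [Nat.cast_sub hj]; ring
  have hsum : (b.drop j).sum = b.sum - (b.take j).sum := by
    have : (b.take j).sum + (b.drop j).sum = b.sum := by
      rw [← List.sum_append, List.take_append_drop]
    omega
  rw [l1, l2, hsum]
  ring

lemma pairwise_split (b : List Int) (hpw : b.Pairwise (· ≤ ·)) (i : Nat) (hi : i < b.length) :
    (∀ x ∈ b.take i, x ≤ b[i]) ∧ (∀ x ∈ b.drop i, b[i] ≤ x) := by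
  have hpg := List.pairwise_iff_getElem.1 hpw
  constructor
  · intro x hx
    obtain ⟨p, hp, he⟩ := List.mem_iff_getElem.1 hx
    have hp' : p < i := by have := hp; simp [List.length_take] at this; omega
    have : (b.take i)[p] = b[p] := List.getElem_take
    rw [← he, this]
    exact hpg p i (by omega) hi hp'
  · intro x hx
    obtain ⟨p, hp, he⟩ := List.mem_iff_getElem.1 hx
    have hp' : i + p < b.length := by have := hp; simp [List.length_drop] at this; omega
    have : (b.drop i)[p] = b[i + p] := List.getElem_drop ..
    rw [← he, this]
    rcases Nat.eq_zero_or_pos p with rfl | hpos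
    · simp
    · exact hpg i (i + p) hi hp' (by omega)

theorem alif_spec : Claim_equal_alif := by
  unfold Claim_equal_alif
  intro n k a _ hpre
  obtain ⟨hne, hnlen⟩ := hpre
  unfold Spec_alif
  simp only [alif_eq, alt_eq]
  set s := PySem.List.sorted a (fun x => x) false with hs
  have hsne : s ≠ [] := fun h => hne ((PySem.List.sorted_eq_nil_iff a _ false).1 (hs ▸ h))
  have hnlen' : n ≤ (s.length : Int) := by
    rw [hs, PySem.List.length_sorted]; exact hnlen
  set lo := (PySem.List.pyGet? s 0).getD 0 with hlo
  set hi := (PySem.List.pyGet? s (-1)).getD 0 with hhi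
  have hpw : s.Pairwise (· ≤ ·) := hs ▸ PySem.List.sorted_pairwise a (fun x => x)
  obtain ⟨m0, tl, hcons⟩ := List.exists_cons_of_ne_nil hsne
  have hlo' : lo = m0 := by rw [hlo, hcons, PySem.List.pyGet?_zero_cons, Option.getD_some]
  have hhi' : hi = s.getLast hsne := by
    rw [hhi, PySem.List.pyGet?_neg_one, List.getLast?_eq_getLast, Option.getD_some]
  have hbound : ∀ x ∈ s, lo ≤ x ∧ x ≤ hi := by
    intro x hx
    constructor
    · rw [hlo']
      exact PySem.List.key_head_sorted_le a (fun x => x) (hs ▸ hcons) x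
        ((PySem.List.mem_sorted a _ false x).1 hx)
    · rw [hhi']
      exact le_getLast_of_pairwise s hpw hsne x hx
  have hlohi : lo ≤ hi := by
    have := (hbound m0 (by rw [hcons]; exact List.mem_cons_self)).2
    rw [hlo']
    exact this
  set nn := max n 0 with hnn
  set c := min (max (n - k) 0) nn with hcdef
  have hc0 : 0 ≤ c := le_min (le_max_right _ _) (le_max_right _ _)
  rw [PySem.List.slice_to s hc0, PySem.List.slice_toNat s hc0 (le_max_right n 0)]
  set lin := (s.take c.toNat).sum with hlin
  set b := List.take (nn.toNat - c.toNat) (List.drop c.toNat s) with hb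
  have hcost : ∀ t, innerA n k s t = costF c lin b t := fun t => inner_eq n k s t hnlen'
  have hrange : PySem.List.pyRange lo (hi + 1) 1 = lo :: PySem.List.pyRange (lo + 1) (hi + 1) 1 :=
    PySem.List.pyRange_one_cons (by omega)
  rw [hrange, optfold_cons (fun t => innerA n k s t) lo _, Option.getD_some]
  simp only [hcost]
  rw [foldl_min_eq_map (costF c lin b)]
  set F := costF c lin b with hF
  have hbmem : ∀ x ∈ b, lo ≤ x ∧ x ≤ hi := by
    intro x hx
    exact hbound x (List.mem_of_mem_drop (List.mem_of_mem_take hx))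
  have hpwb : b.Pairwise (· ≤ ·) :=
    List.Pairwise.sublist ((List.take_sublist _ _).trans (List.drop_sublist _ _)) hpw
  have hcostP : ∀ (i : Nat) (hi : i < b.length),
      costP c lin b ((PySem.List.pyGet? b (i : Int)).getD 0) (i : Int) = F b[i] := by
    intro i hi
    rw [PySem.List.pyGet?_natCast, List.getElem?_eq_getElem hi, Option.getD_some, hF]
    exact costP_eq c lin b[i] b i hi.le (pairwise_split b hpwb i hi).1
      (pairwise_split b hpwb i hi).2
  have hlo0 : costP c lin b lo 0 = F lo := by
    have h := costP_eq c lin lo b 0 (Nat.zero_le _) (by simp)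
      (by intro x hx; rw [List.drop_zero] at hx; exact (hbmem x hx).1)
    simpa using h
  have hhiM : costP c lin b hi (b.length : Int) = F hi := by
    have h := costP_eq c lin hi b b.length le_rfl
      (by intro x hx; rw [List.take_length] at hx; exact (hbmem x hx).2) (by simp)
    simpa using h
  rw [hlo0, hhiM]
  rw [show PySem.List.pyRange 0 (b.length : Int) 1
        = (List.range b.length).map (fun (i : Nat) => (i : Int))
      from PySem.List.pyRange_zero_natCast b.length]
  rw [foldl_min_map_cast
    (fun t => costP c lin b ((PySem.List.pyGet? b t).getD 0) t) (List.range b.length) (F lo)]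
  set LB := (List.range b.length).map
      (fun (i : Nat) => costP c lin b ((PySem.List.pyGet? b (i : Int)).getD 0) (i : Int)) with hLB
  set MA := ((PySem.List.pyRange (lo + 1) (hi + 1) 1).map F).foldl min (F lo) with hMA
  set MB := min (LB.foldl min (F lo)) (F hi) with hMB
  obtain ⟨hA1, hA2⟩ := PySem.List.foldl_min_le ((PySem.List.pyRange (lo + 1) (hi + 1) 1).map F) (F lo)
  obtain ⟨hB1, hB2⟩ := PySem.List.foldl_min_le LB (F lo)
  have hMA_le : ∀ t, lo ≤ t → t ≤ hi → MA ≤ F t := by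
    intro t h1 h2
    rcases eq_or_lt_of_le h1 with rfl | hlt
    · exact hA1
    · exact hA2 (F t) (List.mem_map.2 ⟨t, PySem.List.mem_pyRange_one.2 ⟨by omega, by omega⟩, rfl⟩)
  have hMA_ex : ∃ t, lo ≤ t ∧ t ≤ hi ∧ MA = F t := by
    rcases PySem.List.foldl_min_mem ((PySem.List.pyRange (lo + 1) (hi + 1) 1).map F) (F lo) with h | h
    · exact ⟨lo, le_rfl, hlohi, h⟩
    · obtain ⟨t, ht, he⟩ := List.mem_map.1 h
      obtain ⟨ht1, ht2⟩ := PySem.List.mem_pyRange_one.1 ht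
      exact ⟨t, by omega, by omega, he.symm⟩
  have hLBmem : ∀ y ∈ LB, ∃ x ∈ b, y = F x := by
    intro y hy
    rw [hLB] at hy
    obtain ⟨i, hi, he⟩ := List.mem_map.1 hy
    have hi' : i < b.length := List.mem_range.1 hi
    exact ⟨b[i], List.getElem_mem hi', by rw [← he, hcostP i hi']⟩
  have hLBmem2 : ∀ x ∈ b, F x ∈ LB := by
    intro x hx
    obtain ⟨i, hi, he⟩ := List.mem_iff_getElem.1 hx
    rw [hLB]
    exact List.mem_map.2 ⟨i, List.mem_range.2 hi, by rw [hcostP i hi, he]⟩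
  have hMB_le : ∀ u, u ∈ lo :: ([hi] ++ b) → MB ≤ F u := by
    intro u hu
    rcases List.mem_cons.1 hu with rfl | hu
    · exact le_trans (min_le_left _ _) hB1
    · rcases List.mem_append.1 hu with h | h
      · rw [List.mem_singleton.1 h]
        exact min_le_right _ _
      · exact le_trans (min_le_left _ _) (hB2 (F u) (hLBmem2 u h))
  have hMB_ex : ∃ u, u ∈ lo :: ([hi] ++ b) ∧ MB = F u := by
    rcases min_choice (LB.foldl min (F lo)) (F hi) with h | h
    · rw [hMB, h]
      rcases PySem.List.foldl_min_mem LB (F lo) with h2 | h2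
      · exact ⟨lo, List.mem_cons_self, h2⟩
      · obtain ⟨x, hx, he⟩ := hLBmem _ h2
        exact ⟨x, List.mem_cons_of_mem _ (List.mem_append.2 (Or.inr hx)), he⟩
    · exact ⟨hi, List.mem_cons_of_mem _ (List.mem_append.2 (Or.inl (List.mem_singleton.2 rfl))),
        by rw [hMB, h]⟩
  have hmemrange : ∀ u, u ∈ lo :: ([hi] ++ b) → lo ≤ u ∧ u ≤ hi := by
    intro u hu
    rcases List.mem_cons.1 hu with rfl | hu
    · exact ⟨le_rfl, hlohi⟩
    · rcases List.mem_append.1 hu with h | h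
      · rw [List.mem_singleton.1 h]
        exact ⟨hlohi, le_rfl⟩
      · exact hbmem u h
  apply le_antisymm
  · obtain ⟨u, hu, he⟩ := hMB_ex
    rw [he]
    obtain ⟨l1, l2⟩ := hmemrange u hu
    exact hMA_le u l1 l2
  · obtain ⟨t, h1, h2, he⟩ := hMA_ex
    rw [he]
    obtain ⟨hu1, hu2, hu3, hu4⟩ := condMax t b lo h1
    obtain ⟨hv1, hv2, hv3, hv4⟩ := condMin t b hi h2
    set u' := b.foldl (fun a x => if x ≤ t then max a x else a) lo with hu'
    set v' := b.foldl (fun a x => if t ≤ x then min a x else a) hi with hv'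
    have hgap := gap c lin u' v' t hu1 hv1 b
      (fun x hx => (le_total x t).imp (fun hxt => hu4 x hx hxt) (fun hxt => hv4 x hx hxt))
    have hu'mem : u' ∈ lo :: ([hi] ++ b) := by
      rcases hu2 with h | h
      · rw [h]; exact List.mem_cons_self
      · exact List.mem_cons_of_mem _ (List.mem_append.2 (Or.inr h))
    have hv'mem : v' ∈ lo :: ([hi] ++ b) := by
      rcases hv2 with h | h
      · rw [h]
        exact List.mem_cons_of_mem _ (List.mem_append.2 (Or.inl (List.mem_singleton.2 rfl)))
      · exact List.mem_cons_of_mem _ (List.mem_append.2 (Or.inr h))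
    exact le_trans (le_min (hMB_le u' hu'mem) (hMB_le v' hv'mem)) hgap
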